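-- pv_equiv track=rewrite | github.com/david-revell/pgn-explorer | src/viewer.py | format_position_label
-- ===== SOURCE A (Python) =====
-- def format_position_label(move_sequence: tuple[str, ...]) -> str:
--     if not move_sequence:
--         return "Start"
--
--     parts: list[str] = []
--     for index, move in enumerate(move_sequence):
--         move_number = index // 2 + 1
--         if index % 2 == 0:
--             parts.append(f"{move_number}. {move}")
--         else:
--             parts.append(move)
--     return " ".join(parts)
-- ===== SOURCE B (Python) =====
-- def format_position_label(move_sequence):
--     if not move_sequence:
--         return "Start"
--     n = len(move_sequence)
--     chunks = []
--     i = 0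
--     number = 0
--     while i < n:
--         number += 1
--         if i + 1 < n:
--             chunks.append(f"{number}. {move_sequence[i]} {move_sequence[i+1]}")
--         else:
--             chunks.append(f"{number}. {move_sequence[i]}")
--         i += 2
--     return " ".join(chunks)
-- ===== Notes on version B (the rewrite author's own statement) =====
-- stated objective: alternative
-- what changed: Replaced the per-move enumerate loop with its index-parity branch and //2 arithmetic by a loop over full-move pairs that keeps a running move-number counter and emits one 'n. white black' (or trailing 'n. white') chunk per pair.
import Mathlib
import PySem

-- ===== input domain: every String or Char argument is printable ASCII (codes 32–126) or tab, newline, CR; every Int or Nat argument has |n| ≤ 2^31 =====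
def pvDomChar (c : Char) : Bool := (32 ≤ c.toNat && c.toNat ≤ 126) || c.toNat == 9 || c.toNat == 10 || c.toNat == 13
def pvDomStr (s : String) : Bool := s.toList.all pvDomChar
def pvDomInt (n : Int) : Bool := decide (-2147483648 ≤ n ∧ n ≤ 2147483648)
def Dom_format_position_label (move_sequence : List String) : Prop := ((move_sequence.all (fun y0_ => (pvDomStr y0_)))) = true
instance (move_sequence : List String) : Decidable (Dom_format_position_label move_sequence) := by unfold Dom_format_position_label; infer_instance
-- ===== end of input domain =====

-- B replaces the per-move index-parity loop by a recursion over full-move pairs (alternative decomposition, same cost).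

-- ===== PORT A =====
def format_position_label (move_sequence : List String) : String :=
  if move_sequence = [] then "Start"
  else
    let parts : List String :=
      (PySem.List.enumerate move_sequence).foldl
        (fun acc p =>
          let move_number := PySem.Int.floordiv p.1 2 + 1
          if PySem.Int.mod p.1 2 == 0 then
            acc ++ [PySem.Int.toStr move_number ++ ". " ++ p.2]
          else
            acc ++ [p.2]) []
    PySem.Str.join " " parts

-- ===== PORT B =====
-- pyGetD is used only with an in-range non-negative index (the loop guard ensures i < n), where it is exact for move_sequence[i]
def pvPairLoop (ms : List String) (n : Int) (i : Int) (number : Int) (chunks : List String) : List String :=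
  if i < n then
    let number' := number + 1
    let chunk :=
      if i + 1 < n then
        PySem.Int.toStr number' ++ ". " ++ PySem.List.pyGetD ms i "" ++ " " ++ PySem.List.pyGetD ms (i + 1) ""
      else
        PySem.Int.toStr number' ++ ". " ++ PySem.List.pyGetD ms i ""
    pvPairLoop ms n (i + 2) number' (chunks ++ [chunk])
  else chunks
termination_by (n - i).toNat
decreasing_by omega

def format_position_label_alt (move_sequence : List String) : String :=
  if move_sequence = [] then "Start"
  else PySem.Str.join " " (pvPairLoop move_sequence (move_sequence.length : Int) 0 0 [])

-- ===== PRECONDITION & SPEC =====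
def Spec_format_position_label (move_sequence : List String) (out : String) : Prop := out = format_position_label_alt move_sequence
instance (move_sequence : List String) (out : String) : Decidable (Spec_format_position_label move_sequence out) := by unfold Spec_format_position_label; infer_instance

-- ===== CLAIM (what is proved, stated in full; the proofs are below) =====
def Claim_equal_format_position_label : Prop := ∀ (move_sequence : List String), Dom_format_position_label move_sequence → Spec_format_position_label move_sequence (format_position_label move_sequence)

-- ===== LEMMAS AND PROOFS =====

-- proof helper: the chunk list both programs' outputs are joined from
def pvNumberedChunks (moves : List String) (number : Int) : List String :=
  match moves with
  | [] => []
  | [w] => [PySem.Int.toStr number ++ ". " ++ w]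
  | w :: b :: rest =>
      [PySem.Int.toStr number ++ ". " ++ w ++ " " ++ b] ++ pvNumberedChunks rest (number + 1)

-- B's loop builds exactly the pvNumberedChunks of the remaining suffix
theorem pvPairLoop_eq (ms : List String) :
    ∀ (d k : Nat) (num : Int) (chunks : List String), ms.length - k = d →
    pvPairLoop ms (ms.length : Int) (k : Int) num chunks = chunks ++ pvNumberedChunks (ms.drop k) (num + 1) := by
  intro d
  induction d using Nat.strong_induction_on with
  | _ d ih =>
    intro k num chunks hd
    rw [pvPairLoop]
    by_cases h1 : k < ms.length
    · have hget : PySem.List.pyGetD ms (k : Int) "" = ms[k] :=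
        PySem.List.pyGetD_eq_getElem ms "" (by omega) (by exact_mod_cast h1)
      by_cases h2 : k + 1 < ms.length
      · have hget2 : PySem.List.pyGetD ms ((k : Int) + 1) "" = ms[k + 1] := by
          rw [show ((k : Int) + 1) = ((k + 1 : Nat) : Int) by push_cast; ring]
          exact PySem.List.pyGetD_eq_getElem ms "" (by omega) (by exact_mod_cast h2)
        rw [if_pos (show ((k : Int)) < (ms.length : Int) by exact_mod_cast h1)]
        simp only [if_pos (show ((k : Int)) + 1 < (ms.length : Int) by push_cast; omega)]
        rw [show ((k : Int) + 2) = ((k + 2 : Nat) : Int) by push_cast; ring]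
        rw [ih (ms.length - (k + 2)) (by omega) (k + 2) (num + 1) _ rfl]
        rw [hget, hget2]
        have hdrop : ms.drop k = ms[k] :: ms[k + 1] :: ms.drop (k + 2) := by
          rw [List.drop_eq_getElem_cons h1, List.drop_eq_getElem_cons h2]
        rw [hdrop]
        simp [pvNumberedChunks]
      · have hlast : k + 1 = ms.length := by omega
        rw [if_pos (show ((k : Int)) < (ms.length : Int) by exact_mod_cast h1)]
        simp only [if_neg (show ¬ ((k : Int)) + 1 < (ms.length : Int) by push_cast; omega)]
        rw [show ((k : Int) + 2) = ((k + 2 : Nat) : Int) by push_cast; ring]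
        rw [ih (ms.length - (k + 2)) (by omega) (k + 2) (num + 1) _ rfl]
        have hdrop : ms.drop k = [ms[k]] := by
          rw [List.drop_eq_getElem_cons h1]
          simp [List.drop_eq_nil_of_le, hlast]
        rw [hget, hdrop]
        have hdrop2 : ms.drop (k + 2) = [] := List.drop_eq_nil_of_le (by omega)
        rw [hdrop2]
        simp [pvNumberedChunks]
    · rw [if_neg (by exact_mod_cast h1)]
      have : ms.drop k = [] := List.drop_eq_nil_of_le (by omega)
      rw [this]
      simp [pvNumberedChunks]

-- the single per-move formatter A's loop applies at index p.1
def pvFmt (p : Int × String) : String :=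
  if PySem.Int.mod p.1 2 == 0 then
    PySem.Int.toStr (PySem.Int.floordiv p.1 2 + 1) ++ ". " ++ p.2
  else p.2

theorem join_pair (a b : String) (rest : List String) :
    PySem.Str.join " " (a :: b :: rest) = PySem.Str.join " " ((a ++ " " ++ b) :: rest) := by
  show String.ofList _ = String.ofList _
  congr 1
  cases rest with
  | nil => simp [PySem.Chars.join, List.intercalate]
  | cons c cs => simp [PySem.Chars.join_cons_cons]

theorem fmt_even (m : Int) (s : String) :
    pvFmt (2 * (m - 1), s) = PySem.Int.toStr m ++ ". " ++ s := by
  have h0 : PySem.Int.mod (2 * (m - 1)) 2 = 0 := (PySem.Int.mod_eq_zero_iff_dvd _ _).2 ⟨m - 1, rfl⟩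
  have h1 : PySem.Int.floordiv (2 * (m - 1)) 2 = m - 1 :=
    (PySem.Int.floordiv_eq_iff_of_pos (by omega)).2 (by omega)
  rw [pvFmt]; simp only [h0, h1]; simp

theorem fmt_odd (m : Int) (s : String) :
    pvFmt (2 * (m - 1) + 1, s) = s := by
  have h0 : PySem.Int.mod (2 * (m - 1) + 1) 2 = 1 := by
    rcases PySem.Int.mod_two_eq (2 * (m - 1) + 1) with h | h
    · exact absurd ((PySem.Int.mod_eq_zero_iff_dvd _ _).1 h) (by omega)
    · exact h
  rw [pvFmt]; simp only [h0]; simp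

theorem join_cons_congr (a : String) {xs ys : List String}
    (h : PySem.Str.join " " xs = PySem.Str.join " " ys) (hn : xs = [] ↔ ys = []) :
    PySem.Str.join " " (a :: xs) = PySem.Str.join " " (a :: ys) := by
  cases xs with
  | nil => rw [hn.1 rfl]
  | cons x xt =>
    cases ys with
    | nil => exact absurd (hn.2 rfl) (by simp)
    | cons y yt =>
      have h' : PySem.Chars.join " ".toList (List.map String.toList (x :: xt)) =
          PySem.Chars.join " ".toList (List.map String.toList (y :: yt)) := by
        have := congrArg String.toList h
        simpa [PySem.Str.toList_join] using this
      show String.ofList _ = String.ofList _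
      congr 1
      simp only [List.map_cons]
      rw [PySem.Chars.join_cons_cons, PySem.Chars.join_cons_cons]
      simp only [List.map_cons] at h'
      rw [h']

theorem chunks_key (moves : List String) (number : Int) :
    PySem.Str.join " " ((PySem.List.enumerate moves (2 * (number - 1))).map pvFmt) =
    PySem.Str.join " " (pvNumberedChunks moves number) := by
  induction moves, number using pvNumberedChunks.induct with
  | case1 n => simp [PySem.List.enumerate_nil, pvNumberedChunks]
  | case2 n w =>
    simp [PySem.List.enumerate_cons, PySem.List.enumerate_nil, pvNumberedChunks, fmt_even]
  | case3 n w b rest ih =>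
    rw [PySem.List.enumerate_cons, PySem.List.enumerate_cons, List.map_cons, List.map_cons,
      fmt_even, show pvFmt (2 * (n - 1) + 1, b) = b from fmt_odd n b, join_pair,
      show 2 * (n - 1) + 1 + 1 = 2 * ((n + 1) - 1) by ring]
    simp only [pvNumberedChunks, List.singleton_append]
    exact join_cons_congr _ ih (by
      constructor
      · intro h
        rcases rest with _ | ⟨x, _ | ⟨y, t⟩⟩ <;> simp_all [PySem.List.enumerate_cons, pvNumberedChunks]
      · intro h
        rcases rest with _ | ⟨x, _ | ⟨y, t⟩⟩ <;> simp_all [PySem.List.enumerate_cons, pvNumberedChunks])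

theorem foldl_body_eq (xs : List (Int × String)) :
    xs.foldl
      (fun acc p =>
        let move_number := PySem.Int.floordiv p.1 2 + 1
        if PySem.Int.mod p.1 2 == 0 then
          acc ++ [PySem.Int.toStr move_number ++ ". " ++ p.2]
        else
          acc ++ [p.2]) [] = xs.map pvFmt := by
  have hb : (fun (acc : List String) (p : Int × String) =>
      let move_number := PySem.Int.floordiv p.1 2 + 1
      if PySem.Int.mod p.1 2 == 0 then
        acc ++ [PySem.Int.toStr move_number ++ ". " ++ p.2]
      else
        acc ++ [p.2]) = fun acc p => acc ++ [pvFmt p] := by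
    funext acc p
    simp only [pvFmt]
    split <;> rfl
  rw [hb]
  simpa using PySem.List.foldl_append_singleton_eq_map pvFmt xs []

-- ===== VERDICT (by name: the statement is the Claim_ definition above) =====
theorem format_position_label_spec : Claim_equal_format_position_label := by
  intro xs _
  unfold Spec_format_position_label format_position_label format_position_label_alt
  by_cases hxs : xs = []
  · simp [hxs]
  · simp only [if_neg hxs]
    rw [foldl_body_eq]
    have h0 := pvPairLoop_eq xs xs.length 0 0 [] rfl
    norm_num at h0
    rw [h0]
    simpa using chunks_key xs 1
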